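-- pv_equiv track=rewrite | github.com/TrishaSrikanth-459/DeployStega | routing/semantic/stego_encoder.py | _required_words_in_order
-- ===== SOURCE A (Python) =====
-- from typing import Dict, Any, List, Tuple, Optional, Set
--
-- def _required_words_in_order(tokens: List[str], required_words: List[str]) -> bool:
--     idx = -1
--     for word in required_words:
--         word_lower = word.lower()
--         try:
--             idx = tokens.index(word_lower, idx + 1)
--         except ValueError:
--             return False
--     return True
-- ===== SOURCE B (Python) =====
-- def _required_words_in_order(tokens, required_words):
--     i = 0
--     n = len(required_words)
--     for token in tokens:
--         if i < n and token == required_words[i].lower():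
--             i += 1
--     return i == n
-- ===== Notes on version B (the rewrite author's own statement) =====
-- stated objective: alternative
-- what changed: The outer loop now runs over tokens advancing an integer pointer into required_words, replacing the loop over required_words with repeated tokens.index(word, idx+1) searches.
import Mathlib
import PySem

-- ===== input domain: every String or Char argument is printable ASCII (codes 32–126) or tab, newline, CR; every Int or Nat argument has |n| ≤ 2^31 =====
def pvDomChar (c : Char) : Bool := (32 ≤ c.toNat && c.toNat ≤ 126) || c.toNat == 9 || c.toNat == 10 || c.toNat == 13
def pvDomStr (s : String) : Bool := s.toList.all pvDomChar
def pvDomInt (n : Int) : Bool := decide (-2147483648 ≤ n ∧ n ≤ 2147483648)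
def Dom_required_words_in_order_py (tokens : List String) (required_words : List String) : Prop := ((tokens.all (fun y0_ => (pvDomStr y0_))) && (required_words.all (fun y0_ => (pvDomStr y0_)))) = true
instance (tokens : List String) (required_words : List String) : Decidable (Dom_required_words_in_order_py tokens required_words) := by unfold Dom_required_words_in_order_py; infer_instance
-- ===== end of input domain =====

-- B replaces the required_words loop with tokens.index searches by a single scan of tokens
-- advancing a pointer into required_words (alternative decomposition; similar cost).

-- ===== PORT A =====
-- Python's tokens.index(w, start) with 0 ≤ start: first index ≥ start holding w, ValueError = none.
-- Here start = idx + 1 is always ≥ 0 (idx is -1 initially, afterwards a found list index),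
-- so (idx + 1).toNat is exact.
def goA_required_words_in_order_py (tokens : List String) (idx : Int) : List String → Bool
  | [] => true
  | w :: ws =>
    let word_lower := PySem.Str.lower w
    match PySem.List.index? (tokens.drop (idx + 1).toNat) word_lower with
    | none => false
    | some k => goA_required_words_in_order_py tokens (((idx + 1).toNat + k : Nat) : Int) ws

def required_words_in_order_py (tokens : List String) (required_words : List String) : Bool :=
  goA_required_words_in_order_py tokens (-1) required_words

-- ===== PORT B =====
def required_words_in_order_py_alt (tokens : List String) (required_words : List String) : Bool :=
  let n := required_words.length
  let i := tokens.foldl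
    (fun i token =>
      if i < n ∧ token = PySem.Str.lower (required_words.getD i "") then i + 1 else i) 0
  i == n

-- ===== PRECONDITION & SPEC =====
def Spec_required_words_in_order_py (tokens : List String) (required_words : List String) (out : Bool) : Prop := out = required_words_in_order_py_alt tokens required_words
instance (tokens : List String) (required_words : List String) (out : Bool) : Decidable (Spec_required_words_in_order_py tokens required_words out) := by unfold Spec_required_words_in_order_py; infer_instance

-- ===== CLAIM (what is proved, stated in full; the proofs are below) =====
def Claim_equal_required_words_in_order_py : Prop := ∀ (tokens : List String) (required_words : List String), Dom_required_words_in_order_py tokens required_words → Spec_required_words_in_order_py tokens required_words (required_words_in_order_py tokens required_words)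

-- ===== LEMMAS AND PROOFS =====

-- canonical greedy subsequence check (recursion on the token list)
def subSeq : List String → List String → Bool
  | [], _ => true
  | _ :: _, [] => false
  | w :: ws, t :: ts => if t = PySem.Str.lower w then subSeq ws ts else subSeq (w :: ws) ts

theorem subSeq_of_not_mem (w : String) (ws ts : List String)
    (h : PySem.Str.lower w ∉ ts) : subSeq (w :: ws) ts = false := by
  induction ts with
  | nil => rfl
  | cons t ts ih =>
    simp only [List.mem_cons, not_or] at h
    simp [subSeq, Ne.symm h.1, ih h.2]

theorem subSeq_append (w : String) (ws pre suf : List String)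
    (h : PySem.Str.lower w ∉ pre) :
    subSeq (w :: ws) (pre ++ PySem.Str.lower w :: suf) = subSeq ws suf := by
  induction pre with
  | nil => simp [subSeq]
  | cons p pre ih =>
    simp only [List.mem_cons, not_or] at h
    simp [subSeq, Ne.symm h.1, ih h.2]

theorem goA_eq_subSeq (tokens : List String) (ws : List String) :
    ∀ n : Nat, goA_required_words_in_order_py tokens ((n : Int) - 1) ws
      = subSeq ws (tokens.drop n) := by
  induction ws with
  | nil => intro n; simp [goA_required_words_in_order_py, subSeq]
  | cons w ws ih =>
    intro n
    have hn : (((n : Int) - 1) + 1).toNat = n := by omega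
    simp only [goA_required_words_in_order_py, hn]
    rcases hidx : PySem.List.index? (tokens.drop n) (PySem.Str.lower w) with _ | k
    · rw [PySem.List.index?_eq_none_iff] at hidx
      exact (subSeq_of_not_mem w ws _ hidx).symm
    · rw [PySem.List.index?_eq_some_iff] at hidx
      obtain ⟨pre, suf, hsplit, hlen, hmem⟩ := hidx
      have h1 : ((n + k : Nat) : Int) = ((n + k + 1 : Nat) : Int) - 1 := by push_cast; ring
      show goA_required_words_in_order_py tokens ((n + k : Nat) : Int) ws = _
      rw [h1, ih (n + k + 1)]
      have h2 : tokens.drop (n + k + 1) = suf := by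
        have : tokens.drop (n + k + 1) = (tokens.drop n).drop (k + 1) := by
          rw [List.drop_drop]; ring_nf
        rw [this, hsplit, ← hlen]
        simp
      rw [h2, hsplit, subSeq_append w ws pre suf hmem]

theorem goB_eq_subSeq (req : List String) :
    ∀ (ts : List String) (i : Nat), i ≤ req.length →
      (ts.foldl (fun i token =>
          if i < req.length ∧ token = PySem.Str.lower (req.getD i "") then i + 1 else i) i
        == req.length) = subSeq (req.drop i) ts := by
  intro ts
  induction ts with
  | nil =>
    intro i hi
    by_cases h : i = req.length
    · subst h; simp [subSeq]
    · have hlt : i < req.length := lt_of_le_of_ne hi h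
      rw [List.drop_eq_getElem_cons hlt]
      simp [subSeq, Nat.ne_of_lt hlt]
  | cons t ts ih =>
    intro i hi
    simp only [List.foldl_cons]
    by_cases h : i = req.length
    · subst h
      have hstep : (if req.length < req.length ∧ t = PySem.Str.lower (req.getD req.length "")
          then req.length + 1 else req.length) = req.length := by
        rw [if_neg]; rintro ⟨h1, -⟩; exact lt_irrefl _ h1
      rw [hstep, ih _ hi]
      simp [List.drop_length, subSeq]
    · have hlt : i < req.length := lt_of_le_of_ne hi h
      have hdrop : req.drop i = req[i] :: req.drop (i + 1) := List.drop_eq_getElem_cons hlt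
      have hgetD : req.getD i "" = req[i] := List.getD_eq_getElem req "" hlt
      by_cases heq : t = PySem.Str.lower req[i]
      · have hstep : (if i < req.length ∧ t = PySem.Str.lower (req.getD i "")
            then i + 1 else i) = i + 1 := by rw [hgetD]; exact if_pos ⟨hlt, heq⟩
        rw [hstep, ih _ hlt, hdrop, subSeq, if_pos heq]
      · have hstep : (if i < req.length ∧ t = PySem.Str.lower (req.getD i "")
            then i + 1 else i) = i := by
          rw [hgetD, if_neg]; rintro ⟨-, h2⟩; exact heq h2
        rw [hstep, ih _ hi, hdrop, subSeq, if_neg heq, ← hdrop]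

-- ===== VERDICT (by name: the statement is the Claim_ definition above) =====
theorem required_words_in_order_py_spec : Claim_equal_required_words_in_order_py := by
  intro tokens required_words _
  unfold Spec_required_words_in_order_py required_words_in_order_py required_words_in_order_py_alt
  have hA := goA_eq_subSeq tokens required_words 0
  norm_num at hA
  rw [hA]
  have hB := goB_eq_subSeq required_words tokens 0 (Nat.zero_le _)
  simpa using hB.symm
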